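-- pv_equiv track=rewrite | github.com/pypi-data/pypi-mirror-403 | packages/multiplex2brightfield/multiplex2brightfield-0.2.6-py3-none-any.whl/multiplex2brightfield/utils.py | find_channels
-- ===== SOURCE A (Python) =====
-- def find_channels(channel_names, marker_channels):
--     """
--     Identify channels whose names match specified marker patterns.
--
--     This function cleans both the provided channel names and marker names (removing hyphens,
--     spaces, and converting to lowercase) before checking for a partial match. It returns all
--     channel names that contain any of the cleaned marker strings.
--
--     Args:
--         channel_names (list of str): List of channel names (e.g., extracted from metadata).
--         marker_channels (list of str): List of marker identifiers to match against channel names.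
--
--     Returns:
--         list of str: Channel names that match any of the provided marker patterns.
--     """
--     def clean_string(s):
--         # Remove hyphens and spaces, convert to lowercase
--         return s.replace("-", "").replace(" ", "").lower()
--
--     # Clean all marker patterns
--     clean_markers = [clean_string(marker) for marker in marker_channels]
--
--     # Find matches while preserving original channel names
--     matches = []
--     for channel in channel_names:
--         clean_channel = clean_string(channel)
--         # Check if any cleaned marker is contained within the cleaned channel name
--         if any(marker in clean_channel for marker in clean_markers):
--             matches.append(channel)
--
--     return matches
-- ===== SOURCE B (Python) =====
-- def find_channels(channel_names, marker_channels):
--     def clean_string(s):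
--         return s.replace("-", "").replace(" ", "").lower()
--
--     cleaned = [clean_string(c) for c in channel_names]
--     hit = [False] * len(channel_names)
--     pending = list(range(len(channel_names)))
--     for marker in marker_channels:
--         cm = clean_string(marker)
--         still = []
--         for i in pending:
--             if cm in cleaned[i]:
--                 hit[i] = True
--             else:
--                 still.append(i)
--         pending = still
--     return [c for c, h in zip(channel_names, hit) if h]
-- ===== Notes on version B (the rewrite author's own statement) =====
-- stated objective: alternative
-- what changed: B inverts the loop nesting: it pre-cleans all channels once and iterates the markers in the outer loop over a shrinking worklist of still-unmatched channel indices, marking matches in a boolean hit vector, and finally filters the original names by the hit vector, instead of A's channel-outer loop with an any-over-markers test and in-loop appends.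
import Mathlib
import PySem

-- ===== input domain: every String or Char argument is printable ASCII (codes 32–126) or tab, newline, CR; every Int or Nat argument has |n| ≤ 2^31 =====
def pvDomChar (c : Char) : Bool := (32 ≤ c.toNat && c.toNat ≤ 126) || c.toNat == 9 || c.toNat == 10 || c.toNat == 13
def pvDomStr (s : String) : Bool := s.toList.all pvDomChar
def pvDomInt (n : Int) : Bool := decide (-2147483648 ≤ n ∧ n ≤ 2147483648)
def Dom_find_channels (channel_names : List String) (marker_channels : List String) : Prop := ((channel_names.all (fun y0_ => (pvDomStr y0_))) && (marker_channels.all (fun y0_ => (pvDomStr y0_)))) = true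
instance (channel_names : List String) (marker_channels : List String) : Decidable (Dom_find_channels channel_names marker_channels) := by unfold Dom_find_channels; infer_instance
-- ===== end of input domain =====

-- ===== PORT A =====
-- B inverts the loop nesting: pre-cleans channels once, marker-outer loop over a boolean
-- hit vector, final zip-filter; objective: alternative (not faster).
-- clean_string(s) = s.replace("-", "").replace(" ", "").lower()  (identical helper in A and B)
def cleanStr (s : String) : String :=
  PySem.Str.lower (PySem.Str.replace (PySem.Str.replace s "-" "") " " "")

def find_channels (channel_names : List String) (marker_channels : List String) : List String :=
  let clean_markers := marker_channels.map (fun marker => cleanStr marker)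
  let matches_ := channel_names.foldl (fun matches_ channel =>
    let clean_channel := cleanStr channel
    if clean_markers.any (fun marker => PySem.Str.isIn marker clean_channel) then
      matches_ ++ [channel]
    else matches_) []
  matches_

-- ===== PORT B =====
def find_channels_alt (channel_names : List String) (marker_channels : List String) : List String :=
  let cleaned := channel_names.map (fun c => cleanStr c)
  let hit0 := channel_names.map (fun _ => false)
  let st := marker_channels.foldl
    (fun (st : List Bool × List Nat) marker =>
      let cm := cleanStr marker
      st.2.foldl
        (fun (st2 : List Bool × List Nat) i =>
          -- cleaned[i]: every i in the worklist came from range(len), so getD is exact here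
          if PySem.Str.isIn cm (cleaned.getD i "") then (st2.1.set i true, st2.2)
          else (st2.1, st2.2 ++ [i]))
        (st.1, ([] : List Nat)))
    (hit0, List.range channel_names.length)
  (channel_names.zip st.1).filterMap (fun p => if p.2 then some p.1 else none)

-- ===== PRECONDITION & SPEC =====
def Spec_find_channels (channel_names : List String) (marker_channels : List String) (out : List String) : Prop := out = find_channels_alt channel_names marker_channels
instance (channel_names : List String) (marker_channels : List String) (out : List String) : Decidable (Spec_find_channels channel_names marker_channels out) := by unfold Spec_find_channels; infer_instance

-- ===== CLAIM (what is proved, stated in full; the proofs are below) =====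
def Claim_equal_find_channels : Prop := ∀ (channel_names : List String) (marker_channels : List String), Dom_find_channels channel_names marker_channels → Spec_find_channels channel_names marker_channels (find_channels channel_names marker_channels)

-- ===== LEMMAS AND PROOFS =====

lemma set_map_range (n i : Nat) (f : Nat → Bool) :
    ((List.range n).map f).set i true = (List.range n).map (fun j => if i = j then true else f j) := by
  apply List.ext_getElem
  · simp
  · intro k hk hk'
    simp [List.getElem_set]

-- one marker's pass over the worklist js: set the matching indices, keep the rest in order
lemma inner_fold (m : Nat → Bool) (js : List Nat) (n : Nat) (f : Nat → Bool) (acc : List Nat) :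
    js.foldl (fun st2 i => if m i then (st2.1.set i true, st2.2) else (st2.1, st2.2 ++ [i]))
      ((List.range n).map f, acc)
    = ((List.range n).map (fun j => f j || (decide (j ∈ js) && m j)),
       acc ++ js.filter (fun i => !m i)) := by
  induction js generalizing f acc with
  | nil => simp
  | cons i t ih =>
    simp only [List.foldl_cons]
    by_cases hm : m i = true
    · rw [if_pos hm, set_map_range, ih]
      refine Prod.ext ?_ ?_
      · apply List.map_congr_left
        intro j _
        by_cases hj : i = j
        · subst hj; simp [hm, List.mem_cons]
        · have hj' : j ≠ i := fun h => hj h.symm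
          simp [hj, hj', List.mem_cons]
      · simp [hm]
    · rw [if_neg (by simp [hm]), ih]
      refine Prod.ext ?_ ?_
      · apply List.map_congr_left
        intro j _
        by_cases hj : j = i <;> simp [hj, hm, List.mem_cons]
      · simp [hm]

-- the marker-outer fold: hit j accumulates 'some processed marker matches channel j',
-- the worklist stays exactly the unmatched indices
lemma outer_fold (mc : List String) (n : Nat) (match_ : String → Nat → Bool) (q : Nat → Bool) :
    mc.foldl
      (fun st marker =>
        st.2.foldl
          (fun st2 i =>
            if match_ marker i then (st2.1.set i true, st2.2) else (st2.1, st2.2 ++ [i]))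
          (st.1, ([] : List Nat)))
      ((List.range n).map q, (List.range n).filter (fun i => !q i))
    = ((List.range n).map (fun j => q j || mc.any (fun m => match_ m j)),
       (List.range n).filter (fun j => !(q j || mc.any (fun m => match_ m j)))) := by
  induction mc generalizing q with
  | nil => simp
  | cons m t ih =>
    simp only [List.foldl_cons]
    rw [inner_fold]
    have h1 : (List.range n).map (fun j => q j || (decide (j ∈ (List.range n).filter (fun i => !q i)) && match_ m j))
        = (List.range n).map (fun j => (fun j => q j || match_ m j) j) := by
      apply List.map_congr_left
      intro j hj
      rw [List.mem_range] at hj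
      by_cases hq : q j = true <;> simp [List.mem_filter, List.mem_range, hj, hq]
    have h2 : (([] : List Nat) ++ ((List.range n).filter (fun i => !q i)).filter (fun i => !match_ m i))
        = (List.range n).filter (fun j => !((fun j => q j || match_ m j) j)) := by
      rw [List.nil_append, List.filter_filter]
      apply List.filter_congr
      intro j _
      by_cases hq : q j = true <;> simp [hq]
    rw [h1, h2, ih]
    refine Prod.ext ?_ ?_
    · apply List.map_congr_left
      intro j _
      simp [Bool.or_assoc]
    · apply List.filter_congr
      intro j _
      simp [Bool.or_assoc]

-- reading the hit vector back through the channel list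
lemma map_range_getD (cleaned : List String) (h : Nat → String → Bool) :
    (List.range cleaned.length).map (fun j => h j (cleaned.getD j "")) =
      cleaned.mapIdx (fun j c => h j c) := by
  apply List.ext_getElem
  · simp
  · intro k hk hk'
    simp [List.getD_eq_getElem?_getD, List.getElem?_eq_getElem (by simpa using hk)]

-- zip-with-hit filtering collapses to a plain filter
lemma zip_filterMap (cn : List String) (p : String → Bool) :
    ((cn.zip (cn.map p)).filterMap (fun q => if q.2 then some q.1 else none))
    = cn.filter p := by
  induction cn with
  | nil => rfl
  | cons c cs ih =>
    by_cases h : p c = true <;> simp [h, ih]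

-- ===== VERDICT (by name: the statement is the Claim_ definition above) =====
theorem find_channels_spec : Claim_equal_find_channels := by
  intro cn mc _
  show find_channels cn mc = find_channels_alt cn mc
  unfold find_channels find_channels_alt
  simp only
  rw [PySem.List.foldl_append_if (p := fun channel =>
        (mc.map (fun marker => cleanStr marker)).any
          (fun marker => PySem.Str.isIn marker (cleanStr channel)))
      (f := fun channel => channel)]
  have hinit : (cn.map (fun _ => false), List.range cn.length)
      = ((List.range cn.length).map (fun _ => false),
         (List.range cn.length).filter (fun i => !(fun _ : Nat => false) i)) := by
    simp [List.map_const', List.filter_true]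
  rw [hinit, outer_fold mc cn.length
        (fun marker i => PySem.Str.isIn (cleanStr marker) ((cn.map (fun c => cleanStr c)).getD i ""))
        (fun _ => false)]
  simp only [Bool.false_or]
  have hlen : cn.length = (cn.map (fun c => cleanStr c)).length := by simp
  rw [hlen, map_range_getD (cn.map (fun c => cleanStr c))
        (fun _ c => mc.any (fun m => PySem.Str.isIn (cleanStr m) c))]
  have hmi : (cn.map (fun c => cleanStr c)).mapIdx
        (fun _ c => mc.any (fun m => PySem.Str.isIn (cleanStr m) c))
      = cn.map (fun c => mc.any (fun m => PySem.Str.isIn (cleanStr m) (cleanStr c))) := by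
    rw [List.mapIdx_eq_mapFinIdx, List.mapFinIdx_eq_ofFn]
    apply List.ext_getElem <;> simp
  rw [hmi, zip_filterMap]
  simp [List.map_id', List.any_map, Function.comp_def]
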